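-- pv_equiv track=rewrite | github.com/tonyihvn/nomis_merger | src/utils/id_handler.py | generate_unique_ids
-- ===== SOURCE A (Python) =====
-- def generate_unique_ids(existing_ids, new_ids):
--     unique_ids = set(existing_ids)
--     id_mapping = {}
--
--     for new_id in new_ids:
--         if new_id not in unique_ids:
--             id_mapping[new_id] = new_id
--             unique_ids.add(new_id)
--         else:
--             # Generate a new unique ID
--             counter = 1
--             while f"{new_id}_{counter}" in unique_ids:
--                 counter += 1
--             new_unique_id = f"{new_id}_{counter}"
--             id_mapping[new_id] = new_unique_id
--             unique_ids.add(new_unique_id)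
--
--     return id_mapping
-- ===== SOURCE B (Python) =====
-- def generate_unique_ids(existing_ids, new_ids):
--     # Different algorithm: instead of probing candidate strings f"{id}_{k}" against the
--     # taken set, parse every taken id once into (base, counter) and keep, per base, a
--     # sorted list of taken counters; a collision is resolved by finding the first gap
--     # (mex) in that sorted list in a single walk, inserting it at the gap position.
--     taken = set(existing_ids)
--     counters = {}  # base -> strictly increasing list of counters k>=1 with f"{base}_{k}" taken
--
--     def parse(s):
--         # s == base + "_" + str(k) with k >= 1 in canonical decimal, else None
--         i = len(s)
--         while i > 0 and "0" <= s[i - 1] <= "9":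
--             i -= 1
--         if i == len(s) or i == 0 or s[i - 1] != "_" or s[i] == "0":
--             return None
--         k = 0
--         for c in s[i:]:
--             k = k * 10 + (ord(c) - 48)
--         return s[:i - 1], k
--
--     def note(s):
--         p = parse(s)
--         if p is None:
--             return
--         base, k = p
--         lst = counters.setdefault(base, [])
--         j = 0
--         while j < len(lst) and lst[j] < k:
--             j += 1
--         if j == len(lst) or lst[j] != k:
--             lst.insert(j, k)
--
--     for s in existing_ids:
--         note(s)
--
--     id_mapping = {}
--     for new_id in new_ids:
--         if new_id not in taken:
--             id_mapping[new_id] = new_id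
--             taken.add(new_id)
--             note(new_id)
--         else:
--             lst = counters.setdefault(new_id, [])
--             m = 1
--             j = 0
--             while j < len(lst) and lst[j] == m:
--                 m += 1
--                 j += 1
--             lst.insert(j, m)
--             uid = f"{new_id}_{m}"
--             id_mapping[new_id] = uid
--             taken.add(uid)
--     return id_mapping
-- ===== Notes on version B (the rewrite author's own statement) =====
-- stated objective: alternative
-- what changed: B never probes candidate strings f"{id}_{k}" against the taken set: it parses every taken id once into (base, counter), keeps per base a strictly increasing list of taken counters, and resolves a collision by walking that sorted list to its first gap (mex) and inserting there; string formatting happens only for the returned id.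
import Mathlib
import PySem

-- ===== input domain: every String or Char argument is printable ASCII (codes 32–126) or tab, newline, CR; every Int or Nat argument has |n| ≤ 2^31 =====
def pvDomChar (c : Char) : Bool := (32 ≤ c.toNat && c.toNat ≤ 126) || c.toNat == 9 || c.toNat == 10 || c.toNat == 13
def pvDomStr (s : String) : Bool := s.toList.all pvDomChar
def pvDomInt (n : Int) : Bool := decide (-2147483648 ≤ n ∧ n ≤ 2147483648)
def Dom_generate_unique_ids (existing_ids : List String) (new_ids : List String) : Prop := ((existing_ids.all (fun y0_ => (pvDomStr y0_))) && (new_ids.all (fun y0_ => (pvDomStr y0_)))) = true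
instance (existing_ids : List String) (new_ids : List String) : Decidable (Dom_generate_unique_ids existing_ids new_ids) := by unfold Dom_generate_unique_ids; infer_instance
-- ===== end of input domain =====

-- B replaces A's string-probing collision resolution (try f"{id}_1", f"{id}_2", … against the
-- taken set) by parsing every taken id once into (base, counter) and finding the first gap in
-- a per-base sorted counter list; the return value is proved identical.

-- f"{base}_{counter}"  (the identical formatting expression of both Pythons; counter ≥ 0)
def pvCand (b : String) (k : Nat) : String := b ++ "_" ++ Nat.repr k

-- ===== PORT A =====
-- Python's 'while f"{new_id}_{counter}" in unique_ids: counter += 1', started at c.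
-- The Python while loop carries no fuel; 'fuel' is an upper bound on the number of probes,
-- always called with fuel = S.length + 1, which pvScan_spec/pv_exists_free below prove is
-- enough to reach the first free candidate exactly as Python does.
def pvScan (S : PySem.Set String) (b : String) (c : Nat) : Nat → Nat
  | 0 => c
  | fuel + 1 => if PySem.Set.contains S (pvCand b c) then pvScan S b (c + 1) fuel else c

-- loop body of A: state = (unique_ids, id_mapping)
def pvStepA (st : PySem.Set String × PySem.Dict String String) (new_id : String) :
    PySem.Set String × PySem.Dict String String :=
  if PySem.Set.contains st.1 new_id = false then
    (PySem.Set.add st.1 new_id, st.2.insert new_id new_id)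
  else
    let counter := pvScan st.1 new_id 1 (st.1.length + 1)
    let new_unique_id := pvCand new_id counter
    (PySem.Set.add st.1 new_unique_id, st.2.insert new_id new_unique_id)

def generate_unique_ids (existing_ids : List String) (new_ids : List String) : List (String × String) :=
  (new_ids.foldl pvStepA (PySem.Set.ofList existing_ids, PySem.Dict.empty)).2.items

-- ===== PORT B =====
-- '"0" <= c <= "9"'  (exact: ASCII codes 48–57)
def pvIsDigit (c : Char) : Bool := decide (48 ≤ c.toNat ∧ c.toNat ≤ 57)

-- B's digit-accumulation loop 'k = k*10 + (ord(c) - 48)'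
def pvVal (a : Nat) (cs : List Char) : Nat := cs.foldl (fun a c => a * 10 + (c.toNat - 48)) a

-- B's parse(s): the index loop scanning digits from the right is the takeWhile/dropWhile of
-- the reversed character list (run = s[i:] reversed, rest = s[:i] reversed); exact, by hand
-- since Python's scan is over ASCII chars.
def pvParse (s : String) : Option (String × Nat) :=
  match (s.toList.reverse.takeWhile pvIsDigit).reverse, s.toList.reverse.dropWhile pvIsDigit with
  | [], _ => none                    -- i == len(s)
  | _, [] => none                    -- i == 0
  | c0 :: t, u :: pre =>
    if u = '_' ∧ c0 ≠ '0' then some (String.ofList pre.reverse, pvVal 0 (c0 :: t)) else none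

-- the 'while j < len(lst) and lst[j] < k: j += 1' sorted insert of note()
def pvIns (L : List Nat) (k : Nat) : List Nat :=
  match L with
  | [] => [k]
  | x :: xs => if x < k then x :: pvIns xs k else if x = k then x :: xs else k :: x :: xs

def pvNote (C : PySem.Dict String (List Nat)) (s : String) : PySem.Dict String (List Nat) :=
  match pvParse s with
  | none => C
  | some (b, k) => C.insert b (pvIns (C.getD b []) k)

-- the 'while j < len(lst) and lst[j] == m: m += 1; j += 1' first-gap walk plus lst.insert(j, m)
def pvMexIns (L : List Nat) (m : Nat) : Nat × List Nat :=
  match L with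
  | [] => (m, [m])
  | x :: xs =>
    if x = m then
      let p := pvMexIns xs (m + 1)
      (p.1, x :: p.2)
    else (m, m :: x :: xs)

-- loop body of B: state = (taken, id_mapping, counters)
def pvStepB (st : PySem.Set String × PySem.Dict String String × PySem.Dict String (List Nat))
    (new_id : String) :
    PySem.Set String × PySem.Dict String String × PySem.Dict String (List Nat) :=
  if PySem.Set.contains st.1 new_id = false then
    (PySem.Set.add st.1 new_id, st.2.1.insert new_id new_id, pvNote st.2.2 new_id)
  else
    let p := pvMexIns (st.2.2.getD new_id []) 1
    let uid := pvCand new_id p.1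
    (PySem.Set.add st.1 uid, st.2.1.insert new_id uid, st.2.2.insert new_id p.2)

def generate_unique_ids_alt (existing_ids : List String) (new_ids : List String) : List (String × String) :=
  (new_ids.foldl pvStepB
    (PySem.Set.ofList existing_ids, PySem.Dict.empty,
     existing_ids.foldl pvNote PySem.Dict.empty)).2.1.items

-- ===== PRECONDITION & SPEC =====
def Spec_generate_unique_ids (existing_ids : List String) (new_ids : List String) (out : List (String × String)) : Prop := out = generate_unique_ids_alt existing_ids new_ids
instance (existing_ids : List String) (new_ids : List String) (out : List (String × String)) : Decidable (Spec_generate_unique_ids existing_ids new_ids out) := by unfold Spec_generate_unique_ids; infer_instance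

-- ===== CLAIM (what is proved, stated in full; the proofs are below) =====
def Claim_equal_generate_unique_ids : Prop := ∀ (existing_ids : List String) (new_ids : List String), Dom_generate_unique_ids existing_ids new_ids → Spec_generate_unique_ids existing_ids new_ids (generate_unique_ids existing_ids new_ids)

-- ===== LEMMAS AND PROOFS =====

theorem pv_dc_toNat {m : Nat} (h : m < 10) : (Nat.digitChar m).toNat = 48 + m := by
  interval_cases m <;> decide

theorem pv_dc_digit {m : Nat} (h : m < 10) : pvIsDigit (Nat.digitChar m) = true := by
  interval_cases m <;> decide

theorem pv_dc_of_char {c : Char} (h : pvIsDigit c = true) : Nat.digitChar (c.toNat - 48) = c := by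
  have hb : 48 ≤ c.toNat ∧ c.toNat ≤ 57 := of_decide_eq_true h
  have hofn : Char.ofNat c.toNat = c := Char.ofNat_toNat c
  set m := c.toNat - 48 with hm
  have hcn : c.toNat = 48 + m := by omega
  rw [← hofn, hcn]
  have hm10 : m < 10 := by omega
  interval_cases m <;> decide

theorem pv_toD_digit {c : Char} (h : pvIsDigit c = true) : c.toNat - 48 < 10 := by
  have hb : 48 ≤ c.toNat ∧ c.toNat ≤ 57 := of_decide_eq_true h
  omega

theorem pvToDigitsCore_eq (fuel : Nat) : ∀ (n : Nat) (acc : List Char), n < fuel → 0 < n →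
    Nat.toDigitsCore 10 fuel n acc = ((Nat.digits 10 n).map Nat.digitChar).reverse ++ acc := by
  induction fuel with
  | zero => intro n acc h _; omega
  | succ f ih =>
    intro n acc h hn
    have hdig : Nat.digits 10 n = n % 10 :: Nat.digits 10 (n / 10) :=
      Nat.digits_def' (by norm_num) hn
    simp only [Nat.toDigitsCore]
    split_ifs with h0
    · rw [hdig, h0]
      simp
    · rw [ih (n / 10) _ (by omega) (by omega), hdig]
      simp

theorem pv_repr_toList {k : Nat} (hk : 0 < k) :
    (Nat.repr k).toList = ((Nat.digits 10 k).map Nat.digitChar).reverse := by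
  unfold Nat.repr Nat.toDigits
  rw [String.toList_ofList, pvToDigitsCore_eq (k + 1) k [] (by omega) hk]
  simp

theorem pv_repr_all_digit {k : Nat} (hk : 0 < k) :
    ∀ c ∈ (Nat.repr k).toList, pvIsDigit c = true := by
  rw [pv_repr_toList hk]
  intro c hc
  rw [List.mem_reverse, List.mem_map] at hc
  obtain ⟨d, hd, rfl⟩ := hc
  exact pv_dc_digit (Nat.digits_lt_base (by norm_num) hd)

theorem pv_concat {α : Type} (l : List α) (h : l ≠ []) : ∃ l' a, l = l' ++ [a] := by
  induction l using List.reverseRecOn with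
  | nil => exact absurd rfl h
  | append_singleton l' a _ => exact ⟨l', a, rfl⟩

theorem pv_repr_head {k : Nat} (hk : 0 < k) :
    ∃ c0 t, (Nat.repr k).toList = c0 :: t ∧ c0 ≠ '0' := by
  rw [pv_repr_toList hk]
  have hne : Nat.digits 10 k ≠ [] := Nat.digits_ne_nil_iff_ne_zero.mpr (by omega)
  obtain ⟨ds, d, hds⟩ := pv_concat _ hne
  have hdmem : d ∈ Nat.digits 10 k := by rw [hds]; simp
  have hd10 : d < 10 := Nat.digits_lt_base (by norm_num) hdmem
  have hdne : d ≠ 0 := by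
    have h1 := Nat.getLast_digit_ne_zero 10 (m := k) (by omega)
    simp only [hds, List.getLast_concat] at h1
    exact h1
  refine ⟨Nat.digitChar d, ((ds.map Nat.digitChar).reverse), by rw [hds]; simp, ?_⟩
  intro hc
  have := congrArg Char.toNat hc
  rw [pv_dc_toNat hd10] at this
  simp at this
  omega

theorem pvVal_eq (t : List Char) : ∀ (a : Nat),
    pvVal a t = a * 10 ^ t.length + Nat.ofDigits 10 ((t.map (fun c => c.toNat - 48)).reverse) := by
  induction t with
  | nil => intro a; simp [pvVal, Nat.ofDigits_nil]
  | cons c cs ih =>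
    intro a
    have h1 : pvVal a (c :: cs) = pvVal (a * 10 + (c.toNat - 48)) cs := by
      simp [pvVal]
    rw [h1, ih]
    simp only [List.map_cons, List.reverse_cons, Nat.ofDigits_append, List.length_cons,
      List.length_reverse, List.length_map, Nat.ofDigits_singleton]
    ring

theorem pv_val_repr {k : Nat} (hk : 0 < k) : pvVal 0 (Nat.repr k).toList = k := by
  rw [pvVal_eq, pv_repr_toList hk]
  simp only [Nat.zero_mul, Nat.zero_add, List.map_reverse, List.reverse_reverse]
  rw [List.map_map]
  have hmap : (Nat.digits 10 k).map ((fun c => c.toNat - 48) ∘ Nat.digitChar) = Nat.digits 10 k := by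
    refine (List.map_congr_left ?_).trans (List.map_id _)
    intro d hd
    have := pv_dc_toNat (Nat.digits_lt_base (by norm_num) hd)
    simp [Function.comp, this]
  rw [hmap, Nat.ofDigits_digits]

theorem pv_canonical_repr {c0 : Char} {t : List Char} (h0 : pvIsDigit c0 = true)
    (ht : ∀ c ∈ t, pvIsDigit c = true) (hne : c0 ≠ '0') :
    0 < pvVal 0 (c0 :: t) ∧ (Nat.repr (pvVal 0 (c0 :: t))).toList = c0 :: t := by
  set l := ((c0 :: t).map (fun c => c.toNat - 48)).reverse with hl
  have hval : pvVal 0 (c0 :: t) = Nat.ofDigits 10 l := by rw [pvVal_eq]; simp [hl]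
  have hdall : ∀ d ∈ l, d < 10 := by
    intro d hd
    rw [hl, List.mem_reverse, List.mem_map] at hd
    obtain ⟨c, hc, rfl⟩ := hd
    rcases List.mem_cons.mp hc with rfl | hc'
    · exact pv_toD_digit h0
    · exact pv_toD_digit (ht c hc')
  have hlshape : l = (t.map (fun c => c.toNat - 48)).reverse ++ [c0.toNat - 48] := by
    rw [hl]; simp
  have hlast : ∀ (h : l ≠ []), l.getLast h ≠ 0 := by
    intro h
    simp only [hlshape, List.getLast_concat]
    intro hz
    apply hne
    have := pv_dc_of_char h0
    rw [hz] at this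
    exact this.symm
  have hdig := Nat.digits_ofDigits 10 (by norm_num) l hdall hlast
  have hne' : l ≠ [] := by rw [hlshape]; simp
  have hkpos : 0 < Nat.ofDigits 10 l := by
    rcases Nat.eq_zero_or_pos (Nat.ofDigits 10 l) with h0' | h0'
    · rw [h0'] at hdig
      simp only [Nat.digits_zero] at hdig
      exact absurd hdig.symm hne'
    · exact h0'
  refine ⟨by rwa [hval], ?_⟩
  rw [hval, pv_repr_toList hkpos, hdig, hl, List.map_reverse, List.reverse_reverse,
    List.map_map]
  refine (List.map_congr_left ?_).trans (List.map_id _)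
  intro c hc
  rcases List.mem_cons.mp hc with rfl | hc'
  · exact pv_dc_of_char h0
  · exact pv_dc_of_char (ht c hc')

theorem pv_parse_pvCand {b : String} {k : Nat} (hk : 0 < k) :
    pvParse (pvCand b k) = some (b, k) := by
  obtain ⟨c0, t, hrepr, hne0⟩ := pv_repr_head hk
  have hdig := pv_repr_all_digit hk
  have hlist : (pvCand b k).toList = b.toList ++ '_' :: (Nat.repr k).toList := by
    simp [pvCand, String.toList_append]
  have hrev : (pvCand b k).toList.reverse
      = (Nat.repr k).toList.reverse ++ '_' :: b.toList.reverse := by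
    rw [hlist]; simp
  have hund : pvIsDigit '_' = false := by decide
  have htake : (pvCand b k).toList.reverse.takeWhile pvIsDigit
      = (Nat.repr k).toList.reverse := by
    rw [hrev, List.takeWhile_append_of_pos (fun c hc => hdig c (List.mem_reverse.mp hc))]
    simp [hund]
  have hdrop : (pvCand b k).toList.reverse.dropWhile pvIsDigit
      = '_' :: b.toList.reverse := by
    rw [hrev, List.dropWhile_append_of_pos (fun c hc => hdig c (List.mem_reverse.mp hc))]
    simp [hund]
  unfold pvParse
  rw [htake, hdrop, List.reverse_reverse, hrepr]
  show (if ('_' = '_' ∧ c0 ≠ '0') then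
      some (String.ofList b.toList.reverse.reverse, pvVal 0 (c0 :: t)) else none) = some (b, k)
  rw [if_pos ⟨rfl, hne0⟩, List.reverse_reverse, String.ofList_toList, ← hrepr,
    pv_val_repr hk]

theorem pv_parse_some {s b : String} {k : Nat} (h : pvParse s = some (b, k)) :
    s = pvCand b k ∧ 0 < k := by
  cases hrun : (s.toList.reverse.takeWhile pvIsDigit).reverse with
  | nil =>
    unfold pvParse at h; rw [hrun] at h
    have h' : (none : Option (String × Nat)) = some (b, k) := h
    cases h' 
  | cons c0 t =>
  cases hrest : s.toList.reverse.dropWhile pvIsDigit with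
  | nil =>
    unfold pvParse at h; rw [hrun, hrest] at h
    have h' : (none : Option (String × Nat)) = some (b, k) := h
    cases h' 
  | cons u pre =>
  unfold pvParse at h
  rw [hrun, hrest] at h
  have h' : (if u = '_' ∧ c0 ≠ '0' then
      some (String.ofList pre.reverse, pvVal 0 (c0 :: t)) else none) = some (b, k) := h
  clear h
  split_ifs at h' with hcond
  obtain ⟨hu, hne0⟩ := hcond
  injection h' with h
  have hb : b = String.ofList pre.reverse := (congrArg Prod.fst h).symm
  have hk : k = pvVal 0 (c0 :: t) := (congrArg Prod.snd h).symm
  have hdigs : ∀ c ∈ c0 :: t, pvIsDigit c = true := by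
    intro c hc
    rw [← hrun, List.mem_reverse] at hc
    exact List.mem_takeWhile_imp hc
  obtain ⟨hpos, hcanon⟩ := pv_canonical_repr (hdigs c0 List.mem_cons_self)
    (fun c hc => hdigs c (List.mem_cons_of_mem _ hc)) hne0
  have htw : s.toList.reverse.takeWhile pvIsDigit = (c0 :: t).reverse := by
    rw [← hrun, List.reverse_reverse]
  have hsl : s.toList = pre.reverse ++ '_' :: (c0 :: t) := by
    have hsplit := List.takeWhile_append_dropWhile (p := pvIsDigit) (l := s.toList.reverse)
    rw [htw, hrest] at hsplit
    have := congrArg List.reverse hsplit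
    rw [List.reverse_reverse] at this
    rw [← this, List.reverse_append, List.reverse_reverse, List.reverse_cons, hu]
    simp
  refine ⟨String.toList_inj.mp ?_, hk ▸ hpos⟩
  rw [hsl, hb]
  simp [pvCand, String.toList_append, String.toList_ofList, hk ▸ hcanon]

theorem pvCand_inj2 {b b' : String} {k k' : Nat} (hk : 0 < k) (hk' : 0 < k')
    (h : pvCand b k = pvCand b' k') : b = b' ∧ k = k' := by
  have h1 := pv_parse_pvCand (b := b) hk
  have h2 := pv_parse_pvCand (b := b') hk'
  rw [h, h2] at h1
  injection h1 with h1
  exact ⟨(congrArg Prod.fst h1).symm, (congrArg Prod.snd h1).symm⟩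

theorem pv_contains_iff (S : PySem.Set String) (x : String) :
    PySem.Set.contains S x = true ↔ x ∈ S := by
  simp [PySem.Set.contains]

theorem pv_contains_add_iff (S : PySem.Set String) (x y : String) :
    PySem.Set.contains (PySem.Set.add S x) y = true ↔
      PySem.Set.contains S y = true ∨ y = x := by
  rw [pv_contains_iff, PySem.Set.mem_add, pv_contains_iff]

-- some candidate among c, c+1, …, c+S.length is not in S (pigeonhole)
theorem pv_exists_free (S : PySem.Set String) (b : String) (c : Nat) (hc : 1 ≤ c) :
    ∃ k, c ≤ k ∧ k < c + (S.length + 1) ∧ PySem.Set.contains S (pvCand b k) = false := by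
  by_contra hcon
  push Not at hcon
  have hsub : ((List.range' c (S.length + 1)).map (pvCand b)) ⊆ S := by
    intro x hx
    rcases List.mem_map.mp hx with ⟨k, hk, rfl⟩
    have hk' := List.mem_range'_1.mp hk
    have := hcon k hk'.1 hk'.2
    exact (pv_contains_iff ..).mp (by revert this; cases PySem.Set.contains S (pvCand b k) <;> simp)
  have hnd : ((List.range' c (S.length + 1)).map (pvCand b)).Nodup := by
    refine List.Nodup.map_on ?_ List.nodup_range'
    intro x hx y hy hxy
    have hx1 : 1 ≤ x := le_trans hc (List.mem_range'_1.mp hx).1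
    have hy1 : 1 ≤ y := le_trans hc (List.mem_range'_1.mp hy).1
    exact (pvCand_inj2 hx1 hy1 hxy).2
  have hle := (List.subperm_of_subset hnd hsub).length_le
  simp only [List.length_map, List.length_range'] at hle
  omega

-- with enough fuel, pvScan returns the least free counter ≥ c
theorem pvScan_spec (fuel : Nat) : ∀ (S : PySem.Set String) (b : String) (c : Nat),
    (∃ k, c ≤ k ∧ k < c + fuel ∧ PySem.Set.contains S (pvCand b k) = false) →
    c ≤ pvScan S b c fuel ∧ PySem.Set.contains S (pvCand b (pvScan S b c fuel)) = false ∧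
      ∀ k, c ≤ k → k < pvScan S b c fuel → PySem.Set.contains S (pvCand b k) = true := by
  induction fuel with
  | zero => intro S b c ⟨k, h1, h2, _⟩; omega
  | succ f ih =>
    intro S b c ⟨k, h1, h2, h3⟩
    simp only [pvScan]
    by_cases hcc : PySem.Set.contains S (pvCand b c) = true
    · rw [if_pos hcc]
      have hkc : c + 1 ≤ k := by
        rcases Nat.eq_or_lt_of_le h1 with rfl | h
        · rw [hcc] at h3; exact absurd h3 (by simp)
        · omega
      obtain ⟨ha, hb', hm⟩ := ih S b (c + 1) ⟨k, hkc, by omega, h3⟩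
      refine ⟨by omega, hb', fun j hj1 hj2 => ?_⟩
      rcases Nat.eq_or_lt_of_le hj1 with rfl | h
      · exact hcc
      · exact hm j h hj2
    · rw [if_neg hcc]
      exact ⟨le_refl c, by revert hcc; cases PySem.Set.contains S (pvCand b c) <;> simp,
        fun j hj1 hj2 => by omega⟩

-- specification of B's sorted insert
theorem pvIns_spec (L : List Nat) (k : Nat) (h : L.Pairwise (· < ·)) :
    (pvIns L k).Pairwise (· < ·) ∧ ∀ x, x ∈ pvIns L k ↔ x ∈ L ∨ x = k := by
  induction L with
  | nil => exact ⟨List.pairwise_singleton _ _, fun x => by simp [pvIns]⟩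
  | cons y ys ih =>
    rw [List.pairwise_cons] at h
    obtain ⟨hlt, hys⟩ := h
    obtain ⟨ihs, ihm⟩ := ih hys
    by_cases h1 : y < k
    · rw [show pvIns (y :: ys) k = y :: pvIns ys k from by simp [pvIns, h1]]
      refine ⟨List.pairwise_cons.mpr ⟨fun x hx => ?_, ihs⟩, fun x => ?_⟩
      · rcases (ihm x).mp hx with hx' | rfl
        · exact hlt x hx'
        · exact h1
      · rw [List.mem_cons, List.mem_cons, ihm x]; tauto
    · by_cases h2 : y = k
      · rw [show pvIns (y :: ys) k = y :: ys from by simp [pvIns, h2]]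
        refine ⟨List.pairwise_cons.mpr ⟨hlt, hys⟩, fun x => ?_⟩
        subst h2
        simp only [List.mem_cons]; tauto
      · rw [show pvIns (y :: ys) k = k :: y :: ys from by simp [pvIns, h1, h2]]
        have hky : k < y := by omega
        refine ⟨List.pairwise_cons.mpr ⟨fun x hx => ?_, List.pairwise_cons.mpr ⟨hlt, hys⟩⟩,
          fun x => by simp only [List.mem_cons]; tauto⟩
        rcases List.mem_cons.mp hx with rfl | hx'
        · exact hky
        · exact lt_trans hky (hlt x hx')

-- specification of B's first-gap walk: on a strictly sorted list all of whose elements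
-- are ≥ m it returns the least r ≥ m not in the list, and inserts it
theorem pvMexIns_spec (L : List Nat) : ∀ (m : Nat), L.Pairwise (· < ·) → (∀ x ∈ L, m ≤ x) →
    m ≤ (pvMexIns L m).1 ∧ (pvMexIns L m).1 ∉ L ∧
    (∀ j, m ≤ j → j < (pvMexIns L m).1 → j ∈ L) ∧
    (pvMexIns L m).2.Pairwise (· < ·) ∧
    (∀ x, x ∈ (pvMexIns L m).2 ↔ x ∈ L ∨ x = (pvMexIns L m).1) := by
  induction L with
  | nil =>
    intro m _ _
    simp only [pvMexIns]
    exact ⟨le_refl m, List.not_mem_nil, fun j h1 h2 => absurd h2 (by omega),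
      List.pairwise_singleton _ _, fun x => by simp⟩
  | cons x xs ih =>
    intro m hp hlb
    rw [List.pairwise_cons] at hp
    obtain ⟨hlt, hxs⟩ := hp
    by_cases hxm : x = m
    · subst hxm
      have hlb' : ∀ y ∈ xs, x + 1 ≤ y := fun y hy => hlt y hy
      obtain ⟨ih1, ih2, ih3, ih4, ih5⟩ := ih (x + 1) hxs hlb'
      rw [show pvMexIns (x :: xs) x = ((pvMexIns xs (x + 1)).1, x :: (pvMexIns xs (x + 1)).2)
        from by simp [pvMexIns]]
      refine ⟨by omega, ?_, fun j hj1 hj2 => ?_, ?_, fun y => ?_⟩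
      · intro hmem
        rcases List.mem_cons.mp hmem with heq | hmem'
        · omega
        · exact ih2 hmem'
      · rcases Nat.eq_or_lt_of_le hj1 with rfl | hj
        · exact List.mem_cons_self
        · exact List.mem_cons_of_mem _ (ih3 j hj hj2)
      · refine List.pairwise_cons.mpr ⟨fun y hy => ?_, ih4⟩
        rcases (ih5 y).mp hy with hy' | rfl
        · exact hlt y hy'
        · omega
      · rw [List.mem_cons, ih5 y, List.mem_cons]; tauto
    · have hxm' : m < x := lt_of_le_of_ne (hlb x List.mem_cons_self) (fun h => hxm h.symm)
      rw [show pvMexIns (x :: xs) m = (m, m :: x :: xs) from by simp [pvMexIns, hxm]]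
      refine ⟨le_refl m, fun hmem => ?_, fun j h1 h2 => absurd h2 (by omega), ?_,
        fun y => by simp only [List.mem_cons]; tauto⟩
      · rcases List.mem_cons.mp hmem with heq | hmem'
        · exact hxm heq.symm
        · have := hlt m hmem'; omega
      · refine List.pairwise_cons.mpr ⟨fun y hy => ?_, List.pairwise_cons.mpr ⟨hlt, hxs⟩⟩
        rcases List.mem_cons.mp hy with rfl | hy'
        · exact hxm'
        · exact lt_trans hxm' (hlt y hy')

-- the invariant tying B's per-base counter lists to A's taken set: each list is strictly
-- increasing and holds exactly the counters k ≥ 1 whose candidate string is taken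
def pvInv (S : PySem.Set String) (C : PySem.Dict String (List Nat)) : Prop :=
  ∀ b, (C.getD b []).Pairwise (· < ·) ∧
    ∀ k, k ∈ C.getD b [] ↔ (0 < k ∧ PySem.Set.contains S (pvCand b k) = true)

theorem pvNote_mem (C : PySem.Dict String (List Nat)) (s : String)
    (h : ∀ b, ((C.getD b [])).Pairwise (· < ·)) :
    (∀ b, (((pvNote C s).getD b [])).Pairwise (· < ·)) ∧
    ∀ b k, k ∈ (pvNote C s).getD b [] ↔ (k ∈ C.getD b [] ∨ (0 < k ∧ s = pvCand b k)) := by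
  cases hp : pvParse s with
  | none =>
    have hnote : pvNote C s = C := by simp [pvNote, hp]
    refine ⟨fun b => by rw [hnote]; exact h b, fun b k => ?_⟩
    rw [hnote]
    constructor
    · exact Or.inl
    · rintro (hk | ⟨hkpos, rfl⟩)
      · exact hk
      · rw [pv_parse_pvCand hkpos] at hp; cases hp
  | some p =>
    obtain ⟨b0, k0⟩ := p
    obtain ⟨hs_eq, hk0⟩ := pv_parse_some hp
    have hnote : pvNote C s = C.insert b0 (pvIns (C.getD b0 []) k0) := by simp [pvNote, hp]
    obtain ⟨hins_sorted, hins_mem⟩ := pvIns_spec (C.getD b0 []) k0 (h b0)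
    constructor
    · intro b
      by_cases hb : b = b0
      · subst hb; rw [hnote, PySem.Dict.getD_insert_self]; exact hins_sorted
      · rw [hnote, PySem.Dict.getD_insert_of_ne _ _ _ hb]; exact h b
    · intro b k
      by_cases hb : b = b0
      · subst hb
        rw [hnote, PySem.Dict.getD_insert_self, hins_mem k]
        constructor
        · rintro (hk | rfl)
          · exact Or.inl hk
          · exact Or.inr ⟨hk0, hs_eq⟩
        · rintro (hk | ⟨hkpos, heq⟩)
          · exact Or.inl hk
          · exact Or.inr ((pvCand_inj2 hk0 hkpos (hs_eq.symm.trans heq)).2).symm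
      · rw [hnote, PySem.Dict.getD_insert_of_ne _ _ _ hb]
        constructor
        · exact Or.inl
        · rintro (hk | ⟨hkpos, heq⟩)
          · exact hk
          · exact absurd (pvCand_inj2 hk0 hkpos (hs_eq.symm.trans heq)).1
              (fun hh => hb hh.symm)

theorem pvNote_inv (S : PySem.Set String) (C : PySem.Dict String (List Nat)) (s : String)
    (h : pvInv S C) : pvInv (PySem.Set.add S s) (pvNote C s) := by
  obtain ⟨hs, hm⟩ := pvNote_mem C s (fun b => (h b).1)
  intro b
  refine ⟨hs b, fun k => ?_⟩
  rw [hm b k, ((h b).2 k), pv_contains_add_iff]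
  constructor
  · rintro (⟨hk, hc⟩ | ⟨hk, rfl⟩)
    · exact ⟨hk, Or.inl hc⟩
    · exact ⟨hk, Or.inr rfl⟩
  · rintro ⟨hk, hc | rfl⟩
    · exact Or.inl ⟨hk, hc⟩
    · exact Or.inr ⟨hk, rfl⟩

theorem pvNoteFold_mem (l : List String) : ∀ (C : PySem.Dict String (List Nat)),
    (∀ b, (C.getD b []).Pairwise (· < ·)) →
    (∀ b, ((l.foldl pvNote C).getD b []).Pairwise (· < ·)) ∧
    ∀ b k, k ∈ (l.foldl pvNote C).getD b [] ↔
      (k ∈ C.getD b [] ∨ (0 < k ∧ pvCand b k ∈ l)) := by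
  induction l with
  | nil => intro C hC; exact ⟨hC, fun b k => by simp⟩
  | cons s l ih =>
    intro C hC
    obtain ⟨hs1, hm1⟩ := pvNote_mem C s hC
    obtain ⟨hs2, hm2⟩ := ih (pvNote C s) hs1
    refine ⟨hs2, fun b k => ?_⟩
    rw [List.foldl_cons] at *
    rw [hm2 b k, hm1 b k]
    constructor
    · rintro ((hk | ⟨hk, rfl⟩) | ⟨hk, hmem⟩)
      · exact Or.inl hk
      · exact Or.inr ⟨hk, List.mem_cons_self⟩
      · exact Or.inr ⟨hk, List.mem_cons_of_mem _ hmem⟩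
    · rintro (hk | ⟨hk, hmem⟩)
      · exact Or.inl (Or.inl hk)
      · rcases List.mem_cons.mp hmem with heq | hmem'
        · exact Or.inl (Or.inr ⟨hk, heq.symm⟩)
        · exact Or.inr ⟨hk, hmem'⟩

theorem pv_init_inv (e : List String) :
    pvInv (PySem.Set.ofList e) (e.foldl pvNote PySem.Dict.empty) := by
  have hempty : ∀ b : String, ((PySem.Dict.empty : PySem.Dict String (List Nat)).getD b []) = [] := by
    intro b; simp [pysem]
  obtain ⟨hs, hm⟩ := pvNoteFold_mem e PySem.Dict.empty (fun b => by rw [hempty b]; exact List.Pairwise.nil)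
  intro b
  refine ⟨hs b, fun k => ?_⟩
  rw [hm b k, hempty b, pv_contains_iff, PySem.Set.mem_ofList]
  simp

-- the main simulation: under the invariant, B's fold computes the same taken set and the
-- same mapping dict as A's fold
theorem pv_fold_eq (l : List String) : ∀ (S : PySem.Set String) (m : PySem.Dict String String)
    (C : PySem.Dict String (List Nat)), pvInv S C →
    (l.foldl pvStepB (S, m, C)).1 = (l.foldl pvStepA (S, m)).1 ∧
    (l.foldl pvStepB (S, m, C)).2.1 = (l.foldl pvStepA (S, m)).2 := by
  induction l with
  | nil => intro S m C _; exact ⟨rfl, rfl⟩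
  | cons a l ih =>
    intro S m C hinv
    rw [List.foldl_cons, List.foldl_cons]
    by_cases hc : PySem.Set.contains S a = true
    · -- collision branch
      have hcf : (PySem.Set.contains S a = false) = False := by rw [hc]; simp
      have hlb : ∀ x ∈ C.getD a [], 1 ≤ x := fun x hx => (((hinv a).2 x).mp hx).1
      obtain ⟨hm1, hnot, hbelow, hsort', hmem'⟩ := pvMexIns_spec (C.getD a []) 1 (hinv a).1 hlb
      obtain ⟨ha1, hfree, hmin⟩ := pvScan_spec (S.length + 1) S a 1 (pv_exists_free S a 1 le_rfl)
      set rA := pvScan S a 1 (S.length + 1) with hrA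
      set rB := (pvMexIns (C.getD a []) 1).1 with hrB
      have hreq : rA = rB := by
        rcases Nat.lt_trichotomy rA rB with hlt' | heq | hgt
        · have hmemA := ((hinv a).2 rA).mp (hbelow rA ha1 hlt')
          rw [hmemA.2] at hfree; exact absurd hfree (by simp)
        · exact heq
        · exact absurd (((hinv a).2 rB).mpr ⟨by omega, hmin rB hm1 hgt⟩) hnot
      have hA : pvStepA (S, m) a = (PySem.Set.add S (pvCand a rA), m.insert a (pvCand a rA)) := by
        simp only [pvStepA, hcf, if_false]
        rw [← hrA]
      have hB : pvStepB (S, m, C) a =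
          (PySem.Set.add S (pvCand a rB), m.insert a (pvCand a rB),
           C.insert a (pvMexIns (C.getD a []) 1).2) := by
        simp only [pvStepB, hcf, if_false]
        rw [← hrB]
      rw [hA, hB, hreq]
      apply ih
      -- invariant is preserved by the collision step
      intro b
      by_cases hb : b = a
      · subst hb
        rw [PySem.Dict.getD_insert_self]
        refine ⟨hsort', fun k => ?_⟩
        rw [hmem' k, pv_contains_add_iff, ((hinv b).2 k)]
        constructor
        · rintro (⟨hk, hcc⟩ | rfl)
          · exact ⟨hk, Or.inl hcc⟩
          · exact ⟨by omega, Or.inr rfl⟩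
        · rintro ⟨hk, hcc | heq⟩
          · exact Or.inl ⟨hk, hcc⟩
          · exact Or.inr (pvCand_inj2 hk (by omega) heq).2
      · rw [PySem.Dict.getD_insert_of_ne _ _ _ hb]
        refine ⟨(hinv b).1, fun k => ?_⟩
        rw [((hinv b).2 k), pv_contains_add_iff]
        constructor
        · rintro ⟨hk, hcc⟩; exact ⟨hk, Or.inl hcc⟩
        · rintro ⟨hk, hcc | heq⟩
          · exact ⟨hk, hcc⟩
          · exact absurd (pvCand_inj2 hk (by omega) heq).1 hb
    · -- fresh-id branch
      have hcf : (PySem.Set.contains S a = false) = True := by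
        revert hc; cases PySem.Set.contains S a <;> simp
      have hA : pvStepA (S, m) a = (PySem.Set.add S a, m.insert a a) := by
        simp only [pvStepA, hcf, if_true]
      have hB : pvStepB (S, m, C) a = (PySem.Set.add S a, m.insert a a, pvNote C a) := by
        simp only [pvStepB, hcf, if_true]
      rw [hA, hB]
      exact ih _ _ _ (pvNote_inv S C a hinv)

-- ===== VERDICT (by name: the statement is the Claim_ definition above) =====
theorem generate_unique_ids_spec : Claim_equal_generate_unique_ids := by
  intro e n _
  unfold Spec_generate_unique_ids generate_unique_ids generate_unique_ids_alt
  have h := pv_fold_eq n (PySem.Set.ofList e) PySem.Dict.empty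
    (e.foldl pvNote PySem.Dict.empty) (pv_init_inv e)
  rw [h.2]
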